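-- pv_equiv track=rewrite | github.com/danjelqose1/order-extractor | backend/dimension_repair.py | _choose_best_match
-- ===== SOURCE A (Python) =====
-- from typing import Any, Dict, Iterable, List, Optional, Tuple
--
-- def _choose_best_match(
--     candidates: Iterable[Tuple[int, int]],
--     width_target: int,
-- ) -> Optional[Tuple[int, int]]:
--     best: Optional[Tuple[int, int]] = None
--     best_score = 2
--     for width, height in candidates:
--         if len(str(height)) != 4 or height < 400:
--             continue
--         if abs(width - width_target) > 2:
--             continue
--         score = 0 if width == width_target else 1
--         if score < best_score:
--             best = (width, height)
--             best_score = score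
--             if score == 0:
--                 break
--     return best
-- ===== SOURCE B (Python) =====
-- from typing import Iterable, Optional, Tuple
--
-- def _choose_best_match(
--     candidates: Iterable[Tuple[int, int]],
--     width_target: int,
-- ) -> Optional[Tuple[int, int]]:
--     cand = list(candidates)
--
--     def valid(w: int, h: int) -> bool:
--         return len(str(h)) == 4 and h >= 400 and abs(w - width_target) <= 2
--
--     # Pass 1: first exact-width valid candidate.
--     for w, h in cand:
--         if valid(w, h) and w == width_target:
--             return (w, h)
--     # Pass 2: no exact match -> first valid candidate at all (or None).
--     for w, h in cand:
--         if valid(w, h):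
--             return (w, h)
--     return None
-- ===== Notes on version B (the rewrite author's own statement) =====
-- stated objective: simpler
-- what changed: Replaced A's single stateful scan with running best/score and early break by two staged early-return search passes over the input: first for an exact-width valid candidate, then for any valid candidate; no score or accumulator is kept.
import Mathlib
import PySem

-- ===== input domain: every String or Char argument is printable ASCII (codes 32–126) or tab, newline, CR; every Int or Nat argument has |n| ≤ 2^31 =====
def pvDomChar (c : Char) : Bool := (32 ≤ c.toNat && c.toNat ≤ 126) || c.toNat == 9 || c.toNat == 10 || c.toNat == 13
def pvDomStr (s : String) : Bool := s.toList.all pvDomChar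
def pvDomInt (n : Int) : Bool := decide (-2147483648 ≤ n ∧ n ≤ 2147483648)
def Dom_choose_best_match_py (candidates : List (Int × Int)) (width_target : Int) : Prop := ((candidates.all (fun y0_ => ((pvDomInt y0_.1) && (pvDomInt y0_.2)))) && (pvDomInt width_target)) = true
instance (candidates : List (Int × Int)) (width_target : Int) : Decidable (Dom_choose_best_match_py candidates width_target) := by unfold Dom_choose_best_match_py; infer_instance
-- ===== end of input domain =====

-- B replaces A's single stateful scan (running best/score, early break) by two staged
-- early-return search passes: first-exact-width valid candidate, else first valid candidate.


-- ===== PORT A =====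
-- the for-loop of A, with state (best, best_score); `break` returns immediately
def chooseLoopA (width_target : Int) : List (Int × Int) → Option (Int × Int) → Int → Option (Int × Int)
  | [], best, _ => best
  | (width, height) :: rest, best, best_score =>
    if PySem.Str.len (PySem.Int.toStr height) ≠ 4 ∨ height < 400 then
      chooseLoopA width_target rest best best_score
    else if |width - width_target| > 2 then
      chooseLoopA width_target rest best best_score
    else
      let score : Int := if width = width_target then 0 else 1
      if score < best_score then
        if score = 0 then some (width, height)   -- break: return best immediately
        else chooseLoopA width_target rest (some (width, height)) score
      else chooseLoopA width_target rest best best_score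

def choose_best_match_py (candidates : List (Int × Int)) (width_target : Int) : Option (Int × Int) :=
  chooseLoopA width_target candidates none 2

-- ===== PORT B =====
-- Source B's `valid` helper
def pvValidB (width_target : Int) (p : Int × Int) : Bool :=
  PySem.Str.len (PySem.Int.toStr p.2) == 4 && 400 ≤ p.2 && |p.1 - width_target| ≤ 2

-- Source B: pass 1 finds the first exact-width valid candidate, pass 2 the first valid one
def choose_best_match_py_alt (candidates : List (Int × Int)) (width_target : Int) : Option (Int × Int) :=
  match candidates.find? (fun p => pvValidB width_target p && p.1 == width_target) with
  | some e => some e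
  | none => candidates.find? (fun p => pvValidB width_target p)

-- ===== PRECONDITION & SPEC =====
def Spec_choose_best_match_py (candidates : List (Int × Int)) (width_target : Int) (out : Option (Int × Int)) : Prop := out = choose_best_match_py_alt candidates width_target
instance (candidates : List (Int × Int)) (width_target : Int) (out : Option (Int × Int)) : Decidable (Spec_choose_best_match_py candidates width_target out) := by unfold Spec_choose_best_match_py; infer_instance

-- ===== CLAIM (what is proved, stated in full; the proofs are below) =====
def Claim_equal_choose_best_match_py : Prop := ∀ (candidates : List (Int × Int)) (width_target : Int), Dom_choose_best_match_py candidates width_target → Spec_choose_best_match_py candidates width_target (choose_best_match_py candidates width_target)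

-- ===== LEMMAS AND PROOFS =====

-- A's loop from the seeded state (best = some m, score 1): only the first exact match changes it
theorem loopA_seed (wt : Int) (cs : List (Int × Int)) (m : Int × Int) :
    chooseLoopA wt cs (some m) 1
      = (match cs.find? (fun p => pvValidB wt p && p.1 == wt) with
         | some e => some e
         | none => some m) := by
  induction cs generalizing m with
  | nil => simp [chooseLoopA]
  | cons c cs ih =>
    obtain ⟨w, h⟩ := c
    by_cases hp : pvValidB wt (w, h) = true
    · obtain ⟨⟨hl, hge⟩, hab⟩ :
        (PySem.Str.len (PySem.Int.toStr h) = 4 ∧ 400 ≤ h) ∧ |w - wt| ≤ 2 := by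
        simpa [pvValidB] using hp
      simp only [chooseLoopA]
      rw [if_neg (not_or.mpr ⟨not_not_intro hl, not_lt.mpr hge⟩), if_neg (not_lt.mpr hab)]
      by_cases hw : w = wt
      · rw [List.find?_cons_of_pos (by subst hw; simp [hp])]
        simp [hw]
      · rw [List.find?_cons_of_neg (by simp [hw])]
        simp [hw, ih]
    · simp only [chooseLoopA]
      rw [List.find?_cons_of_neg (by simp [hp])]
      by_cases hc1 : PySem.Str.len (PySem.Int.toStr h) ≠ 4 ∨ h < 400
      · rw [if_pos hc1]; exact ih m
      · obtain ⟨hl, hge⟩ := not_or.mp hc1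
        have hab : 2 < |w - wt| := by
          by_contra hle
          refine hp ?_
          simp only [pvValidB, Bool.and_eq_true, beq_iff_eq, decide_eq_true_eq]
          exact ⟨⟨not_not.mp hl, not_lt.mp hge⟩, not_lt.mp hle⟩
        rw [if_neg hc1, if_pos hab]; exact ih m

-- A's loop from the initial state computes B's staged result
theorem loopA_init (wt : Int) (cs : List (Int × Int)) :
    chooseLoopA wt cs none 2 = choose_best_match_py_alt cs wt := by
  induction cs with
  | nil => simp [chooseLoopA, choose_best_match_py_alt]
  | cons c cs ih =>
    obtain ⟨w, h⟩ := c
    unfold choose_best_match_py_alt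
    by_cases hp : pvValidB wt (w, h) = true
    · obtain ⟨⟨hl, hge⟩, hab⟩ :
        (PySem.Str.len (PySem.Int.toStr h) = 4 ∧ 400 ≤ h) ∧ |w - wt| ≤ 2 := by
        simpa [pvValidB] using hp
      simp only [chooseLoopA]
      rw [if_neg (not_or.mpr ⟨not_not_intro hl, not_lt.mpr hge⟩), if_neg (not_lt.mpr hab)]
      by_cases hw : w = wt
      · rw [List.find?_cons_of_pos (by subst hw; simp [hp])]
        simp [hw]
      · rw [List.find?_cons_of_neg (by simp [hw]),
            List.find?_cons_of_pos (p := fun p => pvValidB wt p) hp]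
        simp only [hw, if_false]
        rw [if_pos (by norm_num : (1:Int) < 2), if_neg (by norm_num : ¬(1:Int) = 0), loopA_seed]
    · simp only [chooseLoopA]
      rw [List.find?_cons_of_neg (p := fun p => pvValidB wt p && p.1 == wt) (by simp [hp])]
      rw [List.find?_cons_of_neg (p := fun p => pvValidB wt p) (by simp [hp])]
      by_cases hc1 : PySem.Str.len (PySem.Int.toStr h) ≠ 4 ∨ h < 400
      · rw [if_pos hc1]; rw [ih]; rfl
      · obtain ⟨hl, hge⟩ := not_or.mp hc1
        have hab : 2 < |w - wt| := by
          by_contra hle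
          refine hp ?_
          simp only [pvValidB, Bool.and_eq_true, beq_iff_eq, decide_eq_true_eq]
          exact ⟨⟨not_not.mp hl, not_lt.mp hge⟩, not_lt.mp hle⟩
        rw [if_neg hc1, if_pos hab]; rw [ih]; rfl

-- ===== VERDICT (by name: the statement is the Claim_ definition above) =====
theorem choose_best_match_py_spec : Claim_equal_choose_best_match_py := by
  intro candidates wt _
  unfold Spec_choose_best_match_py choose_best_match_py
  exact loopA_init wt candidates
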